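-- pv_equiv track=rewrite | github.com/gobroni1/GOA-home-class-work | code wars/5kuy2.py | digitwise_addition
-- ===== SOURCE A (Python) =====
-- def digitwise_addition(N, K):
--     MOD = 10**9 + 7
--
--     # Convert the number N to a list of digit counts
--     digit_count = [0] * 10
--     for digit in str(N):
--         digit_count[int(digit)] += 1
--
--     # Iterate K times to perform the digitwise addition
--     for _ in range(K):
--         new_digit_count = [0] * 10
--         for digit in range(10):
--             if digit == 9:
--                 new_digit_count[0] += digit_count[digit]
--                 new_digit_count[1] += digit_count[digit]
--             else:
--                 new_digit_count[digit + 1] += digit_count[digit]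
--         digit_count = new_digit_count
--
--     # Calculate the total number of digits
--     total_digits = sum(digit_count)
--
--     return total_digits % MOD
-- ===== SOURCE B (Python) =====
-- def digitwise_addition(N, K):
--     MOD = 10**9 + 7
--     # F(n) = number of digits a single digit 0 becomes after n increment steps:
--     # F(n) = 1 for n <= 9, F(n) = F(n-9) + F(n-10) afterwards (9 -> "10").
--     # A digit d after K steps becomes F(K + d) digits, so the answer is
--     # sum over the digits d of N of F(K + d).  Keep a sliding window
--     # window[j] = F(t + j) mod MOD, j = 0..9, and slide it K times.
--     window = [1] * 10
--     for _ in range(max(K, 0)):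
--         window = window[1:] + [(window[1] + window[0]) % MOD]
--     return sum(window[int(c)] for c in str(N)) % MOD
-- ===== Notes on version B (the rewrite author's own statement) =====
-- stated objective: faster
-- what changed: Instead of evolving the 10 digit-multiplicity counters K times with exact (exponentially growing) integers, B slides a 10-entry window of the scalar length sequence F (F(n)=1 for n<=9, F(n)=F(n-9)+F(n-10)) reduced mod 1e9+7 and returns sum of F(K+d) over the digits d of N.
import Mathlib
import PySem

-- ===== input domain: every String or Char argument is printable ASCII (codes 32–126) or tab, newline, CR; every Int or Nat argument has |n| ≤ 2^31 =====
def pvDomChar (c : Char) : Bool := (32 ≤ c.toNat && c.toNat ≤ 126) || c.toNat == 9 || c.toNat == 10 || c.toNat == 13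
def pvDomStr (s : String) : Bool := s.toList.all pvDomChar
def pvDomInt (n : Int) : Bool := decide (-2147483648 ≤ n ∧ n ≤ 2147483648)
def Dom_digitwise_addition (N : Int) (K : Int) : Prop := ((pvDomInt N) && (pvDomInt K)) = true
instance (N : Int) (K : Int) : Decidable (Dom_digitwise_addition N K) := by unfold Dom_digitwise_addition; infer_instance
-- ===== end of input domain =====

-- B replaces A's K-step evolution of the 10 digit-multiplicity counters (exact, growing
-- integers) by a sliding 10-entry window of the scalar length sequence F reduced mod 1e9+7
-- (F(n)=1 for n≤9, F(n)=F(n-9)+F(n-10)), returning Σ F(K+d) over the digits d of N: faster.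

-- ===== PORT A =====
-- digit_count[int(digit)] += 1   — int(ch) of a single char of str(N) is 0..9 under
-- Pre_ (N ≥ 0), so the plain set/getD with .toNat is exact there
def pvCountStep (dc : List Int) (ch : Char) : List Int :=
  match PySem.Int.ofStr? (String.ofList [ch]) with
  | some i => dc.set i.toNat (dc.getD i.toNat 0 + 1)
  | none => dc   -- Python raises ValueError here; unreachable under Pre_ (N ≥ 0)

-- body of the inner 'for digit in range(10)' loop
def pvStepABody (dc ndc : List Int) (digit : Int) : List Int :=
  if digit = 9 then
    let ndc1 := ndc.set 0 (ndc.getD 0 0 + dc.getD 9 0)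
    ndc1.set 1 (ndc1.getD 1 0 + dc.getD 9 0)
  else
    ndc.set (digit + 1).toNat (ndc.getD (digit + 1).toNat 0 + dc.getD digit.toNat 0)

-- one iteration of A's outer 'for _ in range(K)' loop
def pvStepA (dc : List Int) : List Int :=
  (PySem.List.pyRange 0 10 1).foldl (pvStepABody dc) (List.replicate 10 0)

def digitwise_addition (N : Int) (K : Int) : Int :=
  let dc := (PySem.Int.toStr N).toList.foldl pvCountStep (List.replicate 10 0)
  let dc := (PySem.List.pyRange 0 K 1).foldl (fun dc _ => pvStepA dc) dc
  PySem.Int.mod dc.sum (10 ^ 9 + 7)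

-- ===== PORT B =====
-- window = window[1:] + [(window[1] + window[0]) % MOD]   (window always has 10 entries)
def pvShiftB (w : List Int) : List Int :=
  PySem.List.slice w (some 1) none ++ [PySem.Int.mod (w.getD 1 0 + w.getD 0 0) (10 ^ 9 + 7)]

-- one term of sum(window[int(c)] for c in str(N))
def pvSumStep (w : List Int) (acc : Int) (ch : Char) : Int :=
  acc + match PySem.Int.ofStr? (String.ofList [ch]) with
        | some i => w.getD i.toNat 0
        | none => 0   -- Python raises ValueError here; unreachable under Pre_ (N ≥ 0)

def digitwise_addition_alt (N : Int) (K : Int) : Int :=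
  let w := (PySem.List.pyRange 0 (max K 0) 1).foldl (fun w _ => pvShiftB w) (List.replicate 10 1)
  PySem.Int.mod ((PySem.Int.toStr N).toList.foldl (pvSumStep w) 0) (10 ^ 9 + 7)

-- ===== PRECONDITION & SPEC =====
-- For N < 0 str(N) starts with '-' and int('-') raises ValueError in A (and in B).
def Pre_digitwise_addition (N : Int) (K : Int) : Prop := 0 ≤ N
instance (N : Int) (K : Int) : Decidable (Pre_digitwise_addition N K) := by
  unfold Pre_digitwise_addition; infer_instance
def pvWitness_digitwise_addition : Int × Int := (123, 4)

def Spec_digitwise_addition (N : Int) (K : Int) (out : Int) : Prop := out = digitwise_addition_alt N K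
instance (N : Int) (K : Int) (out : Int) : Decidable (Spec_digitwise_addition N K out) := by
  unfold Spec_digitwise_addition; infer_instance

-- ===== CLAIM (what is proved, stated in full; the proofs are below) =====
def Claim_equal_digitwise_addition : Prop := ∀ (N : Int) (K : Int), Dom_digitwise_addition N K → Pre_digitwise_addition N K → Spec_digitwise_addition N K (digitwise_addition N K)

-- ===== LEMMAS AND PROOFS =====

-- proof-side dot product
def pvDot (v w : List Int) : Int := (List.zipWith (· * ·) v w).sum

lemma pvList10 (v : List Int) (h : v.length = 10) :
    ∃ a0 a1 a2 a3 a4 a5 a6 a7 a8 a9 : Int, v = [a0,a1,a2,a3,a4,a5,a6,a7,a8,a9] := by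
  rcases v with _ | ⟨a0, v⟩; · simp at h
  rcases v with _ | ⟨a1, v⟩; · simp at h
  rcases v with _ | ⟨a2, v⟩; · simp at h
  rcases v with _ | ⟨a3, v⟩; · simp at h
  rcases v with _ | ⟨a4, v⟩; · simp at h
  rcases v with _ | ⟨a5, v⟩; · simp at h
  rcases v with _ | ⟨a6, v⟩; · simp at h
  rcases v with _ | ⟨a7, v⟩; · simp at h
  rcases v with _ | ⟨a8, v⟩; · simp at h
  rcases v with _ | ⟨a9, v⟩; · simp at h
  rcases v with _ | ⟨b, v⟩
  · exact ⟨a0,a1,a2,a3,a4,a5,a6,a7,a8,a9, rfl⟩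
  · simp at h

lemma pvStepA_explicit (a0 a1 a2 a3 a4 a5 a6 a7 a8 a9 : Int) :
    pvStepA [a0,a1,a2,a3,a4,a5,a6,a7,a8,a9] = [a9, a0+a9, a1,a2,a3,a4,a5,a6,a7,a8] := by
  have h : pvStepA [a0,a1,a2,a3,a4,a5,a6,a7,a8,a9]
      = [0+a9, 0+a0+a9, 0+a1, 0+a2, 0+a3, 0+a4, 0+a5, 0+a6, 0+a7, 0+a8] := rfl
  rw [h]; norm_num

lemma pvShiftB_explicit (w0 w1 w2 w3 w4 w5 w6 w7 w8 w9 : Int) :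
    pvShiftB [w0,w1,w2,w3,w4,w5,w6,w7,w8,w9]
      = [w1,w2,w3,w4,w5,w6,w7,w8,w9, PySem.Int.mod (w1+w0) (10^9+7)] := rfl

lemma pvStepA_length (dc : List Int) : (pvStepA dc).length = 10 := by
  rw [pvStepA]
  have h : ∀ (l : List Int) (ndc : List Int),
      (l.foldl (pvStepABody dc) ndc).length = ndc.length := by
    intro l
    induction l with
    | nil => intro ndc; rfl
    | cons x l ih =>
      intro ndc
      rw [List.foldl_cons, ih]
      unfold pvStepABody
      split <;> simp
  rw [h]; simp

lemma pvShiftB_length (w : List Int) (h : w.length = 10) : (pvShiftB w).length = 10 := by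
  rw [pvShiftB, PySem.List.slice_from_one]
  simp [h]

lemma pvWindow_length (k : Nat) : (pvShiftB^[k] (List.replicate 10 1)).length = 10 := by
  induction k with
  | zero => simp
  | succ k ih => rw [Function.iterate_succ_apply']; exact pvShiftB_length _ ih

lemma pvCountStep_length (dc : List Int) (ch : Char) : (pvCountStep dc ch).length = dc.length := by
  unfold pvCountStep
  cases PySem.Int.ofStr? (String.ofList [ch]) <;> simp

lemma pvCounts_length (l : List Char) : ∀ dc : List Int,
    (l.foldl pvCountStep dc).length = dc.length := by
  induction l with
  | nil => intro dc; rfl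
  | cons ch l ih => intro dc; rw [List.foldl_cons, ih, pvCountStep_length]

lemma pvFoldl_const_iterate {α β : Type} (f : α → α) (l : List β) :
    ∀ s : α, l.foldl (fun s _ => f s) s = f^[l.length] s := by
  induction l with
  | nil => intro s; rfl
  | cons x l ih =>
    intro s
    rw [List.foldl_cons, ih, List.length_cons, Function.iterate_succ_apply]

lemma pvMod_modEq (x : Int) :
    PySem.Int.mod x (10^9+7) ≡ x [ZMOD (10^9+7)] := by
  rw [PySem.Int.mod_eq_emod_of_pos (by norm_num)]
  exact Int.emod_emod_of_dvd _ dvd_rfl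

lemma pvAdjoint (v u : List Int) (hv : v.length = 10) (hu : u.length = 10) :
    pvDot (pvStepA v) u ≡ pvDot v (pvShiftB u) [ZMOD (10^9+7)] := by
  obtain ⟨a0,a1,a2,a3,a4,a5,a6,a7,a8,a9, rfl⟩ := pvList10 v hv
  obtain ⟨w0,w1,w2,w3,w4,w5,w6,w7,w8,w9, rfl⟩ := pvList10 u hu
  rw [pvStepA_explicit, pvShiftB_explicit]
  have hd := (pvMod_modEq (w1 + w0)).symm
  rw [Int.modEq_iff_dvd] at hd ⊢
  obtain ⟨c, hc⟩ := hd
  refine ⟨a9 * c, ?_⟩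
  simp only [pvDot, List.zipWith_cons_cons, List.zipWith_nil_right, List.sum_cons, List.sum_nil]
  linear_combination a9 * hc

lemma pvKey (k : Nat) : ∀ v : List Int, v.length = 10 →
    (pvStepA^[k] v).sum ≡ pvDot v (pvShiftB^[k] (List.replicate 10 1)) [ZMOD (10^9+7)] := by
  induction k with
  | zero =>
    intro v hv
    obtain ⟨a0,a1,a2,a3,a4,a5,a6,a7,a8,a9, rfl⟩ := pvList10 v hv
    have he : ([a0,a1,a2,a3,a4,a5,a6,a7,a8,a9] : List Int).sum
        = pvDot [a0,a1,a2,a3,a4,a5,a6,a7,a8,a9] (pvShiftB^[0] (List.replicate 10 1)) := by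
      simp [pvDot]
    rw [Function.iterate_zero_apply, he]
  | succ k ih =>
    intro v hv
    rw [Function.iterate_succ_apply]
    refine (ih (pvStepA v) (pvStepA_length v)).trans ?_
    rw [Function.iterate_succ_apply']
    exact pvAdjoint v _ hv (pvWindow_length k)

-- the value sum(...) adds for one char — 0 exactly when counting leaves dc unchanged
def pvG (w : List Int) (ch : Char) : Int :=
  match PySem.Int.ofStr? (String.ofList [ch]) with
  | some i => w.getD i.toNat 0
  | none => 0

lemma pvDot_countStep (dc w : List Int) (hdc : dc.length = 10) (hw : w.length = 10) (ch : Char) :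
    pvDot (pvCountStep dc ch) w = pvDot dc w + pvG w ch := by
  unfold pvCountStep pvG
  cases hi : PySem.Int.ofStr? (String.ofList [ch]) with
  | none => simp
  | some i =>
    dsimp only
    obtain ⟨a0,a1,a2,a3,a4,a5,a6,a7,a8,a9, rfl⟩ := pvList10 dc hdc
    obtain ⟨b0,b1,b2,b3,b4,b5,b6,b7,b8,b9, rfl⟩ := pvList10 w hw
    by_cases hj : i.toNat < 10
    · set j := i.toNat with hjdef
      interval_cases j <;> (simp [pvDot, List.getD]; ring)
    · rw [List.set_eq_of_length_le (by simp; omega),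
        List.getD_eq_default _ _ (by simp; omega)]
      simp

lemma pvSumFold (l : List Char) : ∀ (dc : List Int) (a : Int) (w : List Int),
    dc.length = 10 → w.length = 10 →
    l.foldl (pvSumStep w) a + pvDot dc w = a + pvDot (l.foldl pvCountStep dc) w := by
  induction l with
  | nil => intro dc a w _ _; simp
  | cons ch l ih =>
    intro dc a w hdc hw
    rw [List.foldl_cons, List.foldl_cons]
    have hIH := ih (pvCountStep dc ch) (pvSumStep w a ch) w
      (by rw [pvCountStep_length]; exact hdc) hw
    have hP := pvDot_countStep dc w hdc hw ch
    have hS : pvSumStep w a ch = a + pvG w ch := by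
      unfold pvSumStep pvG
      cases PySem.Int.ofStr? (String.ofList [ch]) <;> simp
    rw [hS] at hIH
    rw [hS]
    linarith [hIH, hP]

lemma pvDot_zero (w : List Int) (hw : w.length = 10) : pvDot (List.replicate 10 0) w = 0 := by
  obtain ⟨b0,b1,b2,b3,b4,b5,b6,b7,b8,b9, rfl⟩ := pvList10 w hw
  simp [pvDot]

-- ===== VERDICT (by name: the statement is the Claim_ definition above) =====
theorem digitwise_addition_spec : Claim_equal_digitwise_addition := by
  unfold Claim_equal_digitwise_addition
  intro N K _ _
  unfold Spec_digitwise_addition digitwise_addition digitwise_addition_alt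
  simp only [pvFoldl_const_iterate pvStepA, pvFoldl_const_iterate pvShiftB,
    PySem.List.length_pyRange_one]
  have hk : (max K 0 - 0).toNat = (K - 0).toNat := by omega
  rw [hk]
  have hulen := pvWindow_length (K - 0).toNat
  have hclen : ((PySem.Int.toStr N).toList.foldl pvCountStep (List.replicate 10 0)).length = 10 := by
    rw [pvCounts_length]; simp
  have h1 := pvKey (K - 0).toNat _ hclen
  have h2 := pvSumFold (PySem.Int.toStr N).toList (List.replicate 10 0) 0
    (pvShiftB^[(K - 0).toNat] (List.replicate 10 1)) (by simp) hulen
  rw [pvDot_zero _ hulen] at h2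
  have h3 : (PySem.Int.toStr N).toList.foldl
        (pvSumStep (pvShiftB^[(K - 0).toNat] (List.replicate 10 1))) 0
      = pvDot ((PySem.Int.toStr N).toList.foldl pvCountStep (List.replicate 10 0))
          (pvShiftB^[(K - 0).toNat] (List.replicate 10 1)) := by linarith [h2]
  rw [h3, PySem.Int.mod_eq_emod_of_pos (by norm_num : (0:Int) < 10^9+7),
    PySem.Int.mod_eq_emod_of_pos (by norm_num : (0:Int) < 10^9+7)]
  exact h1
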